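-- pv_equiv track=rewrite | github.com/tsuru7/algorithm-study | AtCoder/ABC251/B.py | solve
-- ===== SOURCE A (Python) =====
-- def solve(n,w,a):
--     candidate = set()
--     for i in range(n):
--         candidate.add(a[i])
--     for i in range(n):
--         for j in range(i+1, n):
--             candidate.add(a[i]+a[j])
--     for i in range(n):
--         for j in range(i+1, n):
--             for k in range(j+1, n):
--                 candidate.add(a[i]+a[j]+a[k])
--     ans=0
--     for i in range(1, w+1):
--         if i in candidate:
--             ans += 1
--     return ans
-- ===== SOURCE B (Python) =====
-- def solve(n, w, a):
--     dp1, dp2, dp3 = set(), set(), set()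
--     for i in range(n):
--         x = a[i]
--         dp3 |= {s + x for s in dp2}
--         dp2 |= {s + x for s in dp1}
--         dp1.add(x)
--     cand = dp1 | dp2 | dp3
--     return sum(1 for v in cand if 1 <= v <= w)
-- ===== Notes on version B (the rewrite author's own statement) =====
-- stated objective: alternative
-- what changed: Replaces A's three separate nested index enumerations (single, pair, triple loops) by one left-to-right pass maintaining dp sets of sums of exactly 1, 2 and 3 distinct elements, and counts the candidates lying in [1,w] instead of scanning every integer from 1 to w.
import Mathlib
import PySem

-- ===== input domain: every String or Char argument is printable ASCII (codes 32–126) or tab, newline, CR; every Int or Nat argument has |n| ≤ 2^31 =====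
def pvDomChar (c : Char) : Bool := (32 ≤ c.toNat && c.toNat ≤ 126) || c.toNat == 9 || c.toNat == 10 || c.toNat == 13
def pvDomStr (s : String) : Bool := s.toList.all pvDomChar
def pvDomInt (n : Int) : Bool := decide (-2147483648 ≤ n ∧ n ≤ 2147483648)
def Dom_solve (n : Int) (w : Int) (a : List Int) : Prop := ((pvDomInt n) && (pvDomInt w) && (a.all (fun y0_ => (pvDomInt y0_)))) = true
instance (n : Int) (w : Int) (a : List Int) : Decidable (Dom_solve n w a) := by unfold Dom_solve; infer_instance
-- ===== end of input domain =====

-- B replaces A's three nested index enumerations by a single left-to-right pass keeping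
-- dp sets of sums of exactly 1, 2 and 3 distinct elements, then counts the candidates in [1, w].

-- ===== PORT A =====
def solve (n : Int) (w : Int) (a : List Int) : Int :=
  -- candidate = set(); for i in range(n): candidate.add(a[i])
  let c1 : PySem.Set Int :=
    (PySem.List.pyRange 0 n 1).foldl
      (fun c i => PySem.Set.add c (PySem.List.pyGetD a i 0)) PySem.Set.empty
  -- for i … for j in range(i+1,n): candidate.add(a[i]+a[j])
  let c2 : PySem.Set Int :=
    (PySem.List.pyRange 0 n 1).foldl
      (fun c i => (PySem.List.pyRange (i+1) n 1).foldl
        (fun c j => PySem.Set.add c (PySem.List.pyGetD a i 0 + PySem.List.pyGetD a j 0)) c) c1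
  -- for i … for j … for k in range(j+1,n): candidate.add(a[i]+a[j]+a[k])
  let c3 : PySem.Set Int :=
    (PySem.List.pyRange 0 n 1).foldl
      (fun c i => (PySem.List.pyRange (i+1) n 1).foldl
        (fun c j => (PySem.List.pyRange (j+1) n 1).foldl
          (fun c k => PySem.Set.add c
            (PySem.List.pyGetD a i 0 + PySem.List.pyGetD a j 0 + PySem.List.pyGetD a k 0)) c) c) c2
  -- ans = 0; for i in range(1, w+1): if i in candidate: ans += 1
  (PySem.List.pyRange 1 (w+1) 1).foldl
    (fun ans i => if PySem.Set.contains c3 i then ans + 1 else ans) 0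

-- ===== PORT B =====
-- one loop iteration: x = a[i]; dp3 |= {s+x for s in dp2}; dp2 |= {s+x for s in dp1}; dp1.add(x)
def dpStep (a : List Int) (d : PySem.Set Int × PySem.Set Int × PySem.Set Int) (i : Int) :
    PySem.Set Int × PySem.Set Int × PySem.Set Int :=
  let x := PySem.List.pyGetD a i 0
  let d3 := PySem.Set.union d.2.2 (d.2.1.map (fun s => s + x))
  let d2 := PySem.Set.union d.2.1 (d.1.map (fun s => s + x))
  let d1 := PySem.Set.add d.1 x
  (d1, d2, d3)

def solve_alt (n : Int) (w : Int) (a : List Int) : Int :=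
  let d := (PySem.List.pyRange 0 n 1).foldl (dpStep a)
    (PySem.Set.empty, PySem.Set.empty, PySem.Set.empty)
  let cand : PySem.Set Int := PySem.Set.union (PySem.Set.union d.1 d.2.1) d.2.2
  -- sum(1 for v in cand if 1 <= v <= w)
  cand.foldl (fun acc v => if 1 ≤ v ∧ v ≤ w then acc + 1 else acc) 0

-- ===== PRECONDITION & SPEC =====
-- Pre_ excludes n > len(a), on which A raises IndexError at a[i]; it admits every other input.
def Pre_solve (n : Int) (w : Int) (a : List Int) : Prop := n ≤ (a.length : Int)
instance (n : Int) (w : Int) (a : List Int) : Decidable (Pre_solve n w a) := by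
  unfold Pre_solve; infer_instance

def pvWitness_solve : Int × Int × List Int := (3, 10, [2, 5, 3])

def Spec_solve (n : Int) (w : Int) (a : List Int) (out : Int) : Prop := out = solve_alt n w a
instance (n : Int) (w : Int) (a : List Int) (out : Int) : Decidable (Spec_solve n w a out) := by
  unfold Spec_solve; infer_instance

-- ===== CLAIM (what is proved, stated in full; the proofs are below) =====
def Claim_equal_solve : Prop :=
  ∀ (n : Int) (w : Int) (a : List Int), Dom_solve n w a → Pre_solve n w a →
    Spec_solve n w a (solve n w a)

-- ===== LEMMAS AND PROOFS =====

-- membership after a fold whose step adds exactly the elements satisfying Q i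
theorem mem_foldl_step (l : List Int) (step : PySem.Set Int → Int → PySem.Set Int)
    (Q : Int → Int → Prop)
    (h : ∀ s i x, x ∈ step s i ↔ x ∈ s ∨ Q i x) :
    ∀ (s : PySem.Set Int) (x : Int), x ∈ l.foldl step s ↔ x ∈ s ∨ ∃ i ∈ l, Q i x := by
  induction l with
  | nil => simp
  | cons hd tl ih =>
    intro s x
    simp only [List.foldl_cons, ih, h, List.mem_cons]
    constructor
    · rintro ((hs | hq) | ⟨i, hi, hQ⟩)
      · exact Or.inl hs
      · exact Or.inr ⟨hd, Or.inl rfl, hq⟩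
      · exact Or.inr ⟨i, Or.inr hi, hQ⟩
    · rintro (hs | ⟨i, (rfl | hi), hQ⟩)
      · exact Or.inl (Or.inl hs)
      · exact Or.inl (Or.inr hQ)
      · exact Or.inr ⟨i, hi, hQ⟩

-- the dp invariant: after processing indices 0..m-1 the three sets hold exactly the
-- sums of 1, 2 and 3 elements at strictly increasing indices below m
theorem dp_inv (a : List Int) (m : Nat) :
    let D := (PySem.List.pyRange 0 (m : Int) 1).foldl (dpStep a)
      (PySem.Set.empty, PySem.Set.empty, PySem.Set.empty)
    (∀ x, x ∈ D.1 ↔ ∃ i : Int, 0 ≤ i ∧ i < (m : Int) ∧ x = PySem.List.pyGetD a i 0) ∧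
    (∀ x, x ∈ D.2.1 ↔ ∃ i j : Int, 0 ≤ i ∧ i < j ∧ j < (m : Int) ∧
        x = PySem.List.pyGetD a i 0 + PySem.List.pyGetD a j 0) ∧
    (∀ x, x ∈ D.2.2 ↔ ∃ i j k : Int, 0 ≤ i ∧ i < j ∧ j < k ∧ k < (m : Int) ∧
        x = PySem.List.pyGetD a i 0 + PySem.List.pyGetD a j 0 + PySem.List.pyGetD a k 0) ∧
    D.1.Nodup ∧ D.2.1.Nodup ∧ D.2.2.Nodup := by
  induction m with
  | zero =>
    simp only [Nat.cast_zero, PySem.List.pyRange_one_eq_nil le_rfl, List.foldl_nil]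
    refine ⟨?_, ?_, ?_, ?_, ?_, ?_⟩ <;> simp [PySem.Set.empty] <;> omega
  | succ m ih =>
    have hsplit : PySem.List.pyRange 0 ((m : Int) + 1) 1
        = PySem.List.pyRange 0 (m : Int) 1 ++ [(m : Int)] :=
      PySem.List.pyRange_one_succ_right (by positivity)
    obtain ⟨h1, h2, h3, n1, n2, n3⟩ := ih
    simp only [Nat.cast_succ, hsplit, List.foldl_append, List.foldl_cons, List.foldl_nil]
    set D := (PySem.List.pyRange 0 (m : Int) 1).foldl (dpStep a)
      (PySem.Set.empty, PySem.Set.empty, PySem.Set.empty) with hD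
    refine ⟨?_, ?_, ?_, ?_, ?_, ?_⟩
    · intro x
      simp only [dpStep, PySem.Set.mem_add, h1]
      constructor
      · rintro (⟨i, h0, hm, rfl⟩ | rfl)
        · exact ⟨i, h0, by omega, rfl⟩
        · exact ⟨(m : Int), by positivity, by omega, rfl⟩
      · rintro ⟨i, h0, hm, rfl⟩
        rcases lt_or_ge i (m : Int) with h | h
        · exact Or.inl ⟨i, h0, h, rfl⟩
        · have : i = (m : Int) := by omega
          subst this; exact Or.inr rfl
    · intro x
      simp only [dpStep, PySem.Set.mem_union, List.mem_map, h1, h2]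
      constructor
      · rintro (⟨i, j, h0, hij, hm, rfl⟩ | ⟨s, ⟨i, h0, hm, rfl⟩, rfl⟩)
        · exact ⟨i, j, h0, hij, by omega, rfl⟩
        · exact ⟨i, (m : Int), h0, hm, by omega, rfl⟩
      · rintro ⟨i, j, h0, hij, hm, rfl⟩
        rcases lt_or_ge j (m : Int) with h | h
        · exact Or.inl ⟨i, j, h0, hij, h, rfl⟩
        · have : j = (m : Int) := by omega
          subst this
          exact Or.inr ⟨PySem.List.pyGetD a i 0, ⟨i, h0, hij, rfl⟩, rfl⟩
    · intro x
      simp only [dpStep, PySem.Set.mem_union, List.mem_map, h2, h3]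
      constructor
      · rintro (⟨i, j, k, h0, hij, hjk, hm, rfl⟩ | ⟨s, ⟨i, j, h0, hij, hm, rfl⟩, rfl⟩)
        · exact ⟨i, j, k, h0, hij, hjk, by omega, rfl⟩
        · exact ⟨i, j, (m : Int), h0, hij, hm, by omega, rfl⟩
      · rintro ⟨i, j, k, h0, hij, hjk, hm, rfl⟩
        rcases lt_or_ge k (m : Int) with h | h
        · exact Or.inl ⟨i, j, k, h0, hij, hjk, h, rfl⟩
        · have : k = (m : Int) := by omega
          subst this
          exact Or.inr ⟨PySem.List.pyGetD a i 0 + PySem.List.pyGetD a j 0, ⟨i, j, h0, hij, hjk, rfl⟩, rfl⟩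
    · exact PySem.Set.nodup_add _ _ n1
    · exact PySem.Set.nodup_union _ _ n2
    · exact PySem.Set.nodup_union _ _ n3

-- two ways to count the members of a set that lie in [1, w]
theorem countP_bounds_eq (S T : List Int) (hT : T.Nodup) (hmem : ∀ x, x ∈ S ↔ x ∈ T) (w : Int) :
    ((PySem.List.pyRange 1 (w + 1) 1).countP (fun i => PySem.Set.contains S i))
      = T.countP (fun v => decide (1 ≤ v ∧ v ≤ w)) := by
  rw [List.countP_eq_length_filter, List.countP_eq_length_filter]
  apply List.Perm.length_eq
  rw [List.perm_ext_iff_of_nodup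
    (List.Nodup.filter _ (PySem.List.nodup_pyRange_one 1 (w + 1)))
    (List.Nodup.filter _ hT)]
  intro x
  simp only [List.mem_filter, PySem.List.mem_pyRange_one, decide_eq_true_eq,
    PySem.Set.contains_eq_listContains, List.contains_iff_mem, hmem]
  constructor
  · rintro ⟨⟨h1, h2⟩, h3⟩; exact ⟨h3, h1, by omega⟩
  · rintro ⟨h3, h1, h2⟩; exact ⟨⟨h1, by omega⟩, h3⟩

-- ===== VERDICT (by name: the statement is the Claim_ definition above) =====
theorem solve_spec : Claim_equal_solve := by
  intro n w a _ _
  unfold Spec_solve solve solve_alt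
  simp only []
  rw [PySem.List.foldl_if_add_one, PySem.List.foldl_ite_add_one]
  have hR : PySem.List.pyRange 0 n 1 = PySem.List.pyRange 0 ((n.toNat : Nat) : Int) 1 := by
    rcases le_or_gt 0 n with h | h
    · rw [Int.toNat_of_nonneg h]
    · rw [PySem.List.pyRange_one_eq_nil (le_of_lt h),
        PySem.List.pyRange_one_eq_nil (by omega)]
  rw [hR]
  obtain ⟨h1, h2, h3, n1, n2, n3⟩ := dp_inv a n.toNat
  set D := (PySem.List.pyRange 0 ((n.toNat : Nat) : Int) 1).foldl (dpStep a)
    (PySem.Set.empty, PySem.Set.empty, PySem.Set.empty) with hDdef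
  set R0 := PySem.List.pyRange 0 ((n.toNat : Nat) : Int) 1 with hR0
  -- A's phase-1 set
  set c1 := R0.foldl (fun c i => PySem.Set.add c (PySem.List.pyGetD a i 0)) PySem.Set.empty
    with hc1def
  set c2 := R0.foldl (fun c i => (PySem.List.pyRange (i+1) n 1).foldl
      (fun c j => PySem.Set.add c (PySem.List.pyGetD a i 0 + PySem.List.pyGetD a j 0)) c) c1
    with hc2def
  set c3 := R0.foldl (fun c i => (PySem.List.pyRange (i+1) n 1).foldl
      (fun c j => (PySem.List.pyRange (j+1) n 1).foldl
        (fun c k => PySem.Set.add c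
          (PySem.List.pyGetD a i 0 + PySem.List.pyGetD a j 0 + PySem.List.pyGetD a k 0)) c) c) c2
    with hc3def
  set cand := PySem.Set.union (PySem.Set.union D.1 D.2.1) D.2.2 with hcanddef
  -- membership characterisations of A's three phases
  have hmc1 : ∀ x, x ∈ c1 ↔ ∃ i ∈ R0, x = PySem.List.pyGetD a i 0 := by
    intro x
    rw [hc1def, mem_foldl_step _ _ (fun i x => x = PySem.List.pyGetD a i 0)
      (fun s i x => PySem.Set.mem_add s _ x)]
    simp [PySem.Set.empty]
  have hstep2 : ∀ (s : PySem.Set Int) (i x : Int),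
      x ∈ (PySem.List.pyRange (i+1) n 1).foldl
        (fun c j => PySem.Set.add c (PySem.List.pyGetD a i 0 + PySem.List.pyGetD a j 0)) s ↔
      x ∈ s ∨ ∃ j ∈ PySem.List.pyRange (i+1) n 1,
        x = PySem.List.pyGetD a i 0 + PySem.List.pyGetD a j 0 := by
    intro s i x
    exact mem_foldl_step _ _ (fun j x => x = PySem.List.pyGetD a i 0 + PySem.List.pyGetD a j 0)
      (fun s j x => PySem.Set.mem_add s _ x) s x
  have hmc2 : ∀ x, x ∈ c2 ↔ x ∈ c1 ∨ ∃ i ∈ R0, ∃ j ∈ PySem.List.pyRange (i+1) n 1,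
      x = PySem.List.pyGetD a i 0 + PySem.List.pyGetD a j 0 := by
    intro x
    rw [hc2def, mem_foldl_step _ _
      (fun i x => ∃ j ∈ PySem.List.pyRange (i+1) n 1,
        x = PySem.List.pyGetD a i 0 + PySem.List.pyGetD a j 0)
      hstep2]
  have hstep3i : ∀ (s : PySem.Set Int) (i j x : Int),
      x ∈ (PySem.List.pyRange (j+1) n 1).foldl
        (fun c k => PySem.Set.add c
          (PySem.List.pyGetD a i 0 + PySem.List.pyGetD a j 0 + PySem.List.pyGetD a k 0)) s ↔
      x ∈ s ∨ ∃ k ∈ PySem.List.pyRange (j+1) n 1,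
        x = PySem.List.pyGetD a i 0 + PySem.List.pyGetD a j 0 + PySem.List.pyGetD a k 0 := by
    intro s i j x
    exact mem_foldl_step _ _
      (fun k x => x = PySem.List.pyGetD a i 0 + PySem.List.pyGetD a j 0 + PySem.List.pyGetD a k 0)
      (fun s k x => PySem.Set.mem_add s _ x) s x
  have hstep3 : ∀ (s : PySem.Set Int) (i x : Int),
      x ∈ (PySem.List.pyRange (i+1) n 1).foldl
        (fun c j => (PySem.List.pyRange (j+1) n 1).foldl
          (fun c k => PySem.Set.add c
            (PySem.List.pyGetD a i 0 + PySem.List.pyGetD a j 0 + PySem.List.pyGetD a k 0)) c) s ↔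
      x ∈ s ∨ ∃ j ∈ PySem.List.pyRange (i+1) n 1, ∃ k ∈ PySem.List.pyRange (j+1) n 1,
        x = PySem.List.pyGetD a i 0 + PySem.List.pyGetD a j 0 + PySem.List.pyGetD a k 0 := by
    intro s i x
    exact mem_foldl_step _ _
      (fun j x => ∃ k ∈ PySem.List.pyRange (j+1) n 1,
        x = PySem.List.pyGetD a i 0 + PySem.List.pyGetD a j 0 + PySem.List.pyGetD a k 0)
      (hstep3i · i) s x
  have hmc3 : ∀ x, x ∈ c3 ↔ x ∈ c2 ∨ ∃ i ∈ R0, ∃ j ∈ PySem.List.pyRange (i+1) n 1,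
      ∃ k ∈ PySem.List.pyRange (j+1) n 1,
      x = PySem.List.pyGetD a i 0 + PySem.List.pyGetD a j 0 + PySem.List.pyGetD a k 0 := by
    intro x
    rw [hc3def, mem_foldl_step _ _
      (fun i x => ∃ j ∈ PySem.List.pyRange (i+1) n 1, ∃ k ∈ PySem.List.pyRange (j+1) n 1,
        x = PySem.List.pyGetD a i 0 + PySem.List.pyGetD a j 0 + PySem.List.pyGetD a k 0)
      hstep3]
  -- the two candidate sets have the same members
  have hmem : ∀ x, x ∈ c3 ↔ x ∈ cand := by
    intro x
    rw [hcanddef, PySem.Set.mem_union, PySem.Set.mem_union, hmc3, hmc2, hmc1, h1, h2, h3]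
    simp only [PySem.List.mem_pyRange_one, hR0]
    constructor
    · rintro ((⟨i, ⟨hi0, hin⟩, rfl⟩ | ⟨i, ⟨hi0, hin⟩, j, ⟨hj1, hjn⟩, rfl⟩) |
        ⟨i, ⟨hi0, hin⟩, j, ⟨hj1, hjn⟩, k, ⟨hk1, hkn⟩, rfl⟩)
      · exact Or.inl (Or.inl ⟨i, hi0, hin, rfl⟩)
      · exact Or.inl (Or.inr ⟨i, j, hi0, by omega, by omega, rfl⟩)
      · exact Or.inr ⟨i, j, k, hi0, by omega, by omega, by omega, rfl⟩
    · rintro ((⟨i, hi0, hin, rfl⟩ | ⟨i, j, hi0, hij, hjn, rfl⟩) |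
        ⟨i, j, k, hi0, hij, hjk, hkn, rfl⟩)
      · exact Or.inl (Or.inl ⟨i, ⟨hi0, hin⟩, rfl⟩)
      · exact Or.inl (Or.inr ⟨i, ⟨hi0, by omega⟩, j, ⟨by omega, by omega⟩, rfl⟩)
      · exact Or.inr ⟨i, ⟨hi0, by omega⟩, j, ⟨by omega, by omega⟩, k, ⟨by omega, by omega⟩, rfl⟩
  have hnd : cand.Nodup := by
    rw [hcanddef]
    exact PySem.Set.nodup_union _ _ (PySem.Set.nodup_union _ _ n1)
  rw [countP_bounds_eq c3 cand hnd hmem w]
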